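-- pv_equiv track=rewrite | github.com/saidbek-rahimbekov/wordbuster | wordbuster.py | calc_comb
-- ===== SOURCE A (Python) =====
-- def calc_comb(start, finish, size):
-- 	res = 1
-- 	n = 0
-- 	for i in range(start, finish+1):
-- 		n+=i
-- 	for i in range(n):
-- 		res*=size
-- 	return res
-- ===== SOURCE B (Python) =====
-- def calc_comb(start, finish, size):
--     n = (start + finish) * (finish - start + 1) // 2 if start <= finish else 0
--     return size ** n if n > 0 else 1
-- ===== Notes on version B (the rewrite author's own statement) =====
-- stated objective: alternative
-- what changed: Replaces the summation loop by Gauss's closed-form arithmetic-series formula and the repeated-multiplication loop by a single built-in exponentiation; the output integer itself grows with n, so wall-clock time is dominated by big-integer size and is not measurably better.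
import Mathlib
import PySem

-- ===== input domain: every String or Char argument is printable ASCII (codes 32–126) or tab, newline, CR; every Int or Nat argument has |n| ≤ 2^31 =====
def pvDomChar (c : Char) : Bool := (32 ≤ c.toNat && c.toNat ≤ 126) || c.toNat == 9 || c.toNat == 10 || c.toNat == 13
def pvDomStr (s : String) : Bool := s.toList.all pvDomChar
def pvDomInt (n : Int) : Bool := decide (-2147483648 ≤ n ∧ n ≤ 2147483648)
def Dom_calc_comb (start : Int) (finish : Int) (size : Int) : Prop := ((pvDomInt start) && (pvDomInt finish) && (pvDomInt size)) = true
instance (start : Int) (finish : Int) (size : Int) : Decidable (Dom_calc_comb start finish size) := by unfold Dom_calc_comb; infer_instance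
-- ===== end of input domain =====

-- B replaces A's two loops by Gauss's closed-form sum and a single exponentiation (objective: alternative).

-- ===== PORT A =====
def calc_comb (start : Int) (finish : Int) (size : Int) : Int :=
  -- res = 1; n = 0; for i in range(start, finish+1): n += i
  let n : Int := (PySem.List.pyRange start (finish + 1) 1).foldl (fun n i => n + i) 0
  -- for i in range(n): res *= size
  (PySem.List.pyRange 0 n 1).foldl (fun res _ => res * size) 1

-- ===== PORT B =====
def calc_comb_alt (start : Int) (finish : Int) (size : Int) : Int :=
  let n : Int := if start ≤ finish then PySem.Int.floordiv ((start + finish) * (finish - start + 1)) 2 else 0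
  if 0 < n then size ^ n.toNat else 1

-- ===== PRECONDITION & SPEC =====
def Spec_calc_comb (start : Int) (finish : Int) (size : Int) (out : Int) : Prop := out = calc_comb_alt start finish size
instance (start : Int) (finish : Int) (size : Int) (out : Int) : Decidable (Spec_calc_comb start finish size out) := by unfold Spec_calc_comb; infer_instance

-- ===== CLAIM (what is proved, stated in full; the proofs are below) =====
def Claim_equal_calc_comb : Prop := ∀ (start : Int) (finish : Int) (size : Int), Dom_calc_comb start finish size → Spec_calc_comb start finish size (calc_comb start finish size)

-- ===== LEMMAS AND PROOFS =====

-- A's first loop: twice the sum of range(a, b) is (a + b - 1) * (b - a), for a ≤ b.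
theorem pv_sum_pyRange (m : Nat) : ∀ (a b : Int), a ≤ b → b - a = m →
    2 * ((PySem.List.pyRange a b 1).foldl (fun n i => n + i) 0) = (a + b - 1) * (b - a) := by
  induction m with
  | zero =>
    intro a b hab h0
    have hba : b = a := by omega
    subst hba
    simp [PySem.List.pyRange_one_eq_nil le_rfl]
  | succ k ih =>
    intro a b hab hk
    have hb : b = (b - 1) + 1 := by omega
    have hab' : a ≤ b - 1 := by omega
    rw [hb, PySem.List.pyRange_one_succ_right hab', List.foldl_append]
    have hfold : ∀ (l : List Int) (i0 i1 : Int),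
        l.foldl (fun n i => n + i) (i0 + i1) = l.foldl (fun n i => n + i) i0 + i1 := by
      intro l
      induction l with
      | nil => intro i0 i1; rfl
      | cons x xs ihl => intro i0 i1; simp [List.foldl_cons]; rw [show i0 + i1 + x = i0 + x + i1 by ring, ihl]
    have := ih a (b - 1) hab' (by omega)
    simp only [List.foldl_cons, List.foldl_nil]
    rw [show (PySem.List.pyRange a (b-1) 1).foldl (fun n i => n + i) 0 + (b - 1)
        = (PySem.List.pyRange a (b-1) 1).foldl (fun n i => n + i) (0 + (b - 1)) by rw [hfold]]
    rw [hfold]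
    nlinarith [this]

-- A's second loop: multiplying init by size, once per element, is init * size ^ length.
theorem pv_foldl_mul (size : Int) : ∀ (l : List Int) (init : Int),
    l.foldl (fun res _ => res * size) init = init * size ^ l.length := by
  intro l
  induction l with
  | nil => intro init; simp
  | cons x xs ih => intro init; simp [List.foldl_cons, ih, pow_succ]; ring

-- ===== VERDICT (by name: the statement is the Claim_ definition above) =====
theorem calc_comb_spec : Claim_equal_calc_comb := by
  intro start finish size _
  unfold Spec_calc_comb calc_comb calc_comb_alt
  simp only []
  set n : Int := (PySem.List.pyRange start (finish + 1) 1).foldl (fun n i => n + i) 0 with hn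
  by_cases hsf : start ≤ finish
  · -- n equals the closed-form value
    have h2 : 2 * n = (start + (finish + 1) - 1) * ((finish + 1) - start) :=
      pv_sum_pyRange (finish + 1 - start).toNat start (finish + 1) (by omega) (by omega)
    have hfd : PySem.Int.floordiv ((start + finish) * (finish - start + 1)) 2 = n := by
      rw [PySem.Int.floordiv_eq_ediv_of_pos (by norm_num)]
      have h3 : (start + finish) * (finish - start + 1) = 2 * n := by
        rw [h2]; ring
      rw [h3]; omega
    rw [pv_foldl_mul, PySem.List.length_pyRange_one, if_pos hsf, hfd, one_mul, sub_zero]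
    by_cases hpos : 0 < n
    · rw [if_pos hpos]
    · rw [if_neg hpos, show n.toNat = 0 by omega, pow_zero]
  · -- empty range: n = 0, both sides are 1
    have hnil : PySem.List.pyRange start (finish + 1) 1 = [] :=
      PySem.List.pyRange_one_eq_nil (by omega)
    have hn0 : n = 0 := by rw [hn, hnil]; rfl
    rw [hn0, if_neg hsf]
    simp [PySem.List.pyRange_one_eq_nil (le_refl (0:Int))]
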